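-- pv_equiv track=rewrite | github.com/suraj-iitb/algorithm-identification | tbcnn/crawler/data/shell/python3/shell4047305.py | make_gap_sequence
-- ===== SOURCE A (Python) =====
-- def make_gap_sequence(n):
--     """gap sequence を作成
--
--     とりあえず、Wiki にのっていたやり方のひとつを採用。
--     N ^ 1.5 のオーダーになるという。
--     """
--     seq = []
--     k = 1
--     while True:
--         gap = 2 ** k - 1
--         if gap > n:
--             break
--         seq.append(gap)
--         k += 1
--     seq.reverse()   # in place なので効率が良い。
--     return seq
-- ===== SOURCE B (Python) =====
-- def make_gap_sequence(n):
--     m = (n + 1).bit_length() - 1 if n >= 1 else 0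
--     return [2 ** k - 1 for k in range(m, 0, -1)]
-- ===== Notes on version B (the rewrite author's own statement) =====
-- stated objective: simpler
-- what changed: Replaces A's unbounded while-loop search for the largest gap and the in-place reverse by a closed-form term count m = (n+1).bit_length() - 1 (0 for n < 1) and a direct descending comprehension over range(m, 0, -1).
import Mathlib
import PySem

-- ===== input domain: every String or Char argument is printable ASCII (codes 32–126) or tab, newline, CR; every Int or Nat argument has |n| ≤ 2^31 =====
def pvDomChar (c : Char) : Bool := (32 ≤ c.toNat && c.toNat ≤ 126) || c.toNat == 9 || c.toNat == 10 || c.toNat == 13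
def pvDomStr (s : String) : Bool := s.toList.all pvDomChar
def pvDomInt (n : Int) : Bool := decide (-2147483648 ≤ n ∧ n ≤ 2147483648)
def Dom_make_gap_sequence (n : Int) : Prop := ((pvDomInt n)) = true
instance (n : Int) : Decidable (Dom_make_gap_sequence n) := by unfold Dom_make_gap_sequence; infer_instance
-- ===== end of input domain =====

-- B replaces A's growth loop (and in-place reverse) by a closed-form term count
-- m = (n+1).bit_length() - 1 and a direct descending comprehension; same return value.

-- ===== PORT A =====
-- the while-True loop: append 2^k - 1 while it is ≤ n, incrementing k
def pvALoop (n : Int) (k : Nat) (seq : List Int) : List Int :=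
  if h : 2 ^ k - 1 > n then seq
  else pvALoop n (k + 1) (seq ++ [2 ^ k - 1])
termination_by (n + 2 - 2 ^ k).toNat
decreasing_by
  have h1 : (0:Int) < 2 ^ k := pow_pos (by norm_num) k
  have _h2 : (2:Int) ^ (k + 1) = 2 ^ k + 2 ^ k := by rw [pow_succ]; ring -- omega uses it
  omega


def make_gap_sequence (n : Int) : List Int :=
  (pvALoop n 1 []).reverse

-- ===== PORT B =====
-- (n+1).bit_length() - 1 is ported as Nat.log2 (n+1).toNat : exact for n ≥ 1,
-- where n+1 ≥ 2 > 0 and bit_length x = Nat.log2 x + 1.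
def make_gap_sequence_alt (n : Int) : List Int :=
  let m : Int := if 1 ≤ n then (Nat.log2 (n + 1).toNat : Int) else 0
  (PySem.List.pyRange m 0 (-1)).map (fun k => 2 ^ k.toNat - 1)

-- ===== PRECONDITION & SPEC =====
def Spec_make_gap_sequence (n : Int) (out : List Int) : Prop := out = make_gap_sequence_alt n
instance (n : Int) (out : List Int) : Decidable (Spec_make_gap_sequence n out) := by unfold Spec_make_gap_sequence; infer_instance

-- ===== CLAIM (what is proved, stated in full; the proofs are below) =====
def Claim_equal_make_gap_sequence : Prop := ∀ (n : Int), Dom_make_gap_sequence n → Spec_make_gap_sequence n (make_gap_sequence n)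

-- ===== LEMMAS AND PROOFS =====

-- the loop collects the ascending gaps 2^k - 1, …, 2^M - 1 where M is the last entered exponent
lemma pvALoop_eq (n : Int) (M : Nat) (hub : n + 1 < 2 ^ (M + 1)) (hlb : 2 ^ M ≤ n + 1) :
    ∀ (c k : Nat) (acc : List Int), k + c = M + 1 →
      pvALoop n k acc = acc ++ (List.range' k c).map (fun j => (2:Int) ^ j - 1) := by
  intro c
  induction c with
  | zero =>
    intro k acc hk
    rw [pvALoop.eq_def]
    have : (2:Int) ^ k - 1 > n := by
      have : k = M + 1 := by omega
      subst this; omega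
    simp [this]
  | succ c ih =>
    intro k acc hk
    have hkM : k ≤ M := by omega
    have hle : (2:Int) ^ k ≤ 2 ^ M := pow_le_pow_right₀ (by norm_num) hkM
    rw [pvALoop.eq_def]
    have hng : ¬ ((2:Int) ^ k - 1 > n) := by omega
    simp only [hng, reduceDIte]
    rw [ih (k + 1) (acc ++ [2 ^ k - 1]) (by omega)]
    rw [List.range'_succ]
    simp

lemma log2_bounds (x : Nat) (hx : 1 ≤ x) :
    2 ^ Nat.log2 x ≤ x ∧ x < 2 ^ (Nat.log2 x + 1) :=
  ⟨Nat.log2_self_le (by omega), Nat.lt_log2_self⟩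

theorem make_gap_sequence_spec : Claim_equal_make_gap_sequence := by
  intro n _
  unfold Spec_make_gap_sequence make_gap_sequence make_gap_sequence_alt
  by_cases hn : 1 ≤ n
  · set M := Nat.log2 (n + 1).toNat with hM
    have hx : 1 ≤ (n + 1).toNat := by omega
    obtain ⟨hl, hu⟩ := log2_bounds _ hx
    have hl' : (2:Int) ^ M ≤ n + 1 := by
      calc ((2:Int) ^ M) = ((2 ^ M : Nat) : Int) := by push_cast; ring
        _ ≤ ((n + 1).toNat : Int) := by exact_mod_cast hl
        _ = n + 1 := by omega
    have hu' : n + 1 < (2:Int) ^ (M + 1) := by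
      calc (n + 1 : Int) = ((n + 1).toNat : Int) := by omega
        _ < ((2 ^ (M + 1) : Nat) : Int) := by exact_mod_cast hu
        _ = (2:Int) ^ (M + 1) := by push_cast; ring
    rw [pvALoop_eq n M hu' hl' M 1 [] (by omega)]
    simp only [hn, if_true, List.nil_append]
    rw [PySem.List.pyRange_neg_one_eq_reverse]
    have h01 : (0:Int) + 1 = 1 := by norm_num
    rw [h01, PySem.List.pyRange_one]
    have harg : ((M:Int) + 1 - 1).toNat = M := by omega
    rw [harg, List.range'_eq_map_range, List.map_reverse, List.map_map, List.map_map]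
    congr 1
  · -- n < 1 : the loop breaks immediately (gap 1 > n) and m = 0, both sides are []
    rw [pvALoop.eq_def]
    have hg : (2:Int) ^ 1 - 1 > n := by norm_num; omega
    simp only [hg, reduceDIte, List.reverse_nil, hn, if_false,
      PySem.List.pyRange_neg_one_eq_nil (le_refl (0:Int)), List.map_nil]
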